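-- pv_equiv track=rewrite | github.com/AidenPQ/Advent-of-code | 2024/Day5/print_queue.py | valid_pages_order
-- ===== SOURCE A (Python) =====
-- from functools import cmp_to_key
--
-- def valid_pages_order(pages_order_rules, updates):
--     valid_updates = []
--     corrected_updates = []
--
--     def compare_order(x,y):
--         if x in pages_order_rules and y in pages_order_rules[x]['l']:
--             return 1
--         elif x in pages_order_rules and y in pages_order_rules[x]['r']:
--             return -1
--         else:
--             return 0
--
--     for update in updates:
--         right_order = True
--         for i in range(len(update)):
--             if update[i] in pages_order_rules.keys():
--                 if any(page in update[:i] for page in pages_order_rules[update[i]]['r']) or any(page in update[i:] for page in pages_order_rules[update[i]]['l']):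
--                     right_order = False
--                     break
--         if right_order:
--             valid_updates.append(update)
--         else:
--             corrected_update = sorted(update, key=cmp_to_key(compare_order))
--             corrected_updates.append(corrected_update)
--     return valid_updates, corrected_updates
-- ===== SOURCE B (Python) =====
-- from functools import cmp_to_key
--
-- def valid_pages_order(pages_order_rules, updates):
--     def compare_order(x, y):
--         if x in pages_order_rules and y in pages_order_rules[x]['l']:
--             return 1
--         elif x in pages_order_rules and y in pages_order_rules[x]['r']:
--             return -1
--         else:
--             return 0
--
--     key = cmp_to_key(compare_order)
--     tagged = [(update, sorted(update, key=key)) for update in updates]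
--     return ([u for (u, s) in tagged if s == u],
--             [s for (u, s) in tagged if s != u])
-- ===== Notes on version B (the rewrite author's own statement) =====
-- stated objective: simpler
-- what changed: B drops A's explicit per-index neighbour-scan validity check (the update[:i]/update[i:] membership loops) and its append-in-one-loop accumulation: it pairs each update with its comparator-sorted form in one staged pass and classifies by comprehension, an update being valid exactly when it equals its sorted form.
-- outside the precondition, e.g. on valid_pages_order({1: {'l': [2], 'r': []}}, [[1, 2]]): A returns ([], [[1, 2]]), B returns ([[1, 2]], [])
import Mathlib
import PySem

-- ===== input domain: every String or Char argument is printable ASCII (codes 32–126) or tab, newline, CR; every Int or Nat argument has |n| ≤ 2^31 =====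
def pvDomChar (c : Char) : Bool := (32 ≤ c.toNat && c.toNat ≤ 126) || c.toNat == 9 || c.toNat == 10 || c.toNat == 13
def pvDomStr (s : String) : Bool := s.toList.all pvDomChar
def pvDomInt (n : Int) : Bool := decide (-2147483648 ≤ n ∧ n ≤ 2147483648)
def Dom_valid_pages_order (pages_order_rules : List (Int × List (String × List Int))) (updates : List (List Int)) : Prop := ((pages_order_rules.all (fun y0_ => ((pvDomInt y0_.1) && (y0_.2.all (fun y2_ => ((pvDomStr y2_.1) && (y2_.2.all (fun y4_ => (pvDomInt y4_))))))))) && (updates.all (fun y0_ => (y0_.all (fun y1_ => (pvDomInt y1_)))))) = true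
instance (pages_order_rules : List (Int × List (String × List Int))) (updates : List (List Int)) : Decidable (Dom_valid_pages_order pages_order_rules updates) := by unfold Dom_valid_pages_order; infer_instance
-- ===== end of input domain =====

-- B drops A's explicit neighbour-scan validity check and its append-in-one-loop accumulation: it pairs
-- each update with its comparator-sorted form once and classifies by comprehension (objective: simpler).

-- ===== PORT A =====
-- rules[x] (first-match association-list lookup = Python dict lookup); [] stands for the absent-key case,
-- which Pre_ keeps out of reach wherever the Python would evaluate the lookup.
def pvRulesGet (pages_order_rules : List (Int × List (String × List Int))) (x : Int) : List (String × List Int) :=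
  (pages_order_rules.lookup x).getD []

-- x in pages_order_rules  (key membership)
def pvInKeys (pages_order_rules : List (Int × List (String × List Int))) (x : Int) : Bool :=
  (pages_order_rules.lookup x).isSome

-- rules[x][s]; [] stands for Python's KeyError on a missing 'l'/'r' key (excluded by Pre_).
def pvSide (pages_order_rules : List (Int × List (String × List Int))) (x : Int) (s : String) : List Int :=
  ((pvRulesGet pages_order_rules x).lookup s).getD []

-- compare_order(x, y) as A writes it
def pvCmp (pages_order_rules : List (Int × List (String × List Int))) (x y : Int) : Int :=
  if pvInKeys pages_order_rules x && (pvSide pages_order_rules x "l").contains y then 1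
  else if pvInKeys pages_order_rules x && (pvSide pages_order_rules x "r").contains y then -1
  else 0

-- cmp_to_key(compare_order).__lt__ : the strict "less-than" CPython's sort consults
def pvLt (pages_order_rules : List (Int × List (String × List Int))) (x y : Int) : Bool :=
  decide (pvCmp pages_order_rules x y < 0)

-- sorted(update, key=cmp_to_key(compare_order)) : stable insertion sort on the comparator's __lt__.
-- Exact w.r.t. CPython on Pre_: there the comparator is a strict weak order, where every stable sort
-- (CPython's included) returns the same list.
def pvSortCmp (pages_order_rules : List (Int × List (String × List Int))) (u : List Int) : List Int :=
  u.foldl (fun acc x => PySem.List.insertBy (fun a b => pvLt pages_order_rules a b) x acc) []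

-- body of A's inner validity loop at index i (update[i] in keys, then the two slice-membership 'any's)
def pvBadAt (pages_order_rules : List (Int × List (String × List Int))) (u : List Int) (i : Nat) : Bool :=
  match u[i]? with
  | some p =>
      pvInKeys pages_order_rules p &&
        ((pvSide pages_order_rules p "r").any (fun page => (u.take i).contains page)
          || (pvSide pages_order_rules p "l").any (fun page => (u.drop i).contains page))
  | none => false

-- A's 'for i in range(len(update))' scan with its early break (right_order)
def pvScan (pages_order_rules : List (Int × List (String × List Int))) (u : List Int) (i : Nat) : Bool :=
  if _h : i < u.length then
    if pvBadAt pages_order_rules u i then false else pvScan pages_order_rules u (i + 1)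
  else true
termination_by u.length - i

def valid_pages_order (pages_order_rules : List (Int × List (String × List Int))) (updates : List (List Int)) : List (List Int) × List (List Int) :=
  updates.foldl
    (fun acc update =>
      if pvScan pages_order_rules update 0 then (acc.1 ++ [update], acc.2)
      else (acc.1, acc.2 ++ [pvSortCmp pages_order_rules update]))
    ([], [])

-- ===== PORT B =====
-- B's compare_order(x, y): the same Python text, transliterated with the short-circuit
-- 'x in rules and …' rendered as a match on the dict lookup (no key → both branches false → 0).
def pvCmpB (pages_order_rules : List (Int × List (String × List Int))) (x y : Int) : Int :=
  match pages_order_rules.lookup x with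
  | none => 0
  | some d =>
      if (((d.lookup "l").getD []).contains y) then 1
      else if (((d.lookup "r").getD []).contains y) then -1
      else 0

-- key = cmp_to_key(compare_order); its __lt__
def pvLtB (pages_order_rules : List (Int × List (String × List Int))) (x y : Int) : Bool :=
  decide (pvCmpB pages_order_rules x y < 0)

-- sorted(update, key=key): stable insertion sort on __lt__ (exact on Pre_, see pvSortCmp)
def pvSortB (pages_order_rules : List (Int × List (String × List Int))) (u : List Int) : List Int :=
  u.foldl (fun acc x => PySem.List.insertBy (fun a b => pvLtB pages_order_rules a b) x acc) []

-- tagged = [(update, sorted(update, key=key)) for update in updates]; then the two comprehensions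
def valid_pages_order_alt (pages_order_rules : List (Int × List (String × List Int))) (updates : List (List Int)) : List (List Int) × List (List Int) :=
  let tagged := updates.map (fun update => (update, pvSortB pages_order_rules update))
  ((tagged.filter (fun p => p.2 == p.1)).map Prod.fst,
   (tagged.filter (fun p => !(p.2 == p.1))).map Prod.snd)

-- ===== PRECONDITION & SPEC =====
-- "b must be printed right of a": a in keys and b in rules[a]['r']  (what A's scan checks on the left slice)
def pvRrel (pages_order_rules : List (Int × List (String × List Int))) (a b : Int) : Bool :=
  pvInKeys pages_order_rules a && (pvSide pages_order_rules a "r").contains b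

-- "a must be printed left of b": b in keys and a in rules[b]['l']  (what A's scan checks on the right slice)
def pvLrel (pages_order_rules : List (Int × List (String × List Int))) (a b : Int) : Bool :=
  pvInKeys pages_order_rules b && (pvSide pages_order_rules b "l").contains a

-- Pre_ = the rules are well-formed on the pages each update mentions: every consulted inner dict has its
-- 'l' and 'r' keys (else Python raises KeyError), the 'l' and 'r' lists tell one coherent story
-- (a ∈ rules[b]['l'] ⟺ b ∈ rules[a]['r']), and the induced strict relation is a strict weak order
-- (irreflexive, transitive, with transitive incomparability). It excludes (besides the KeyError inputs)
-- inputs with inconsistent rule dicts: there sorted()'s output is an unspecified artefact of CPython's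
-- Timsort (the docs leave sort order undefined for inconsistent comparators) and A's scan and the sorted
-- order are two equally accidental readings of contradictory rules — see the cited examples.
def Pre_valid_pages_order (pages_order_rules : List (Int × List (String × List Int))) (updates : List (List Int)) : Prop :=
  ∀ u ∈ updates,
    (∀ a ∈ u, pvInKeys pages_order_rules a = true →
        ((pvRulesGet pages_order_rules a).lookup "l").isSome ∧ ((pvRulesGet pages_order_rules a).lookup "r").isSome)
  ∧ (∀ a ∈ u, ∀ b ∈ u, pvLrel pages_order_rules a b = pvRrel pages_order_rules a b)
  ∧ (∀ a ∈ u, pvRrel pages_order_rules a a = false)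
  ∧ (∀ a ∈ u, ∀ b ∈ u, ∀ c ∈ u,
        pvRrel pages_order_rules a b = true → pvRrel pages_order_rules b c = true → pvRrel pages_order_rules a c = true)
  -- transitive incomparability: not used by the equivalence proof below, but part of what makes the
  -- comparator a strict weak order, the domain on which CPython's sorted() is specified (and on which
  -- the two ports' stable insertion sort is exact for both Pythons).
  ∧ (∀ a ∈ u, ∀ b ∈ u, ∀ c ∈ u,
        pvRrel pages_order_rules a b = false → pvRrel pages_order_rules b a = false →
        pvRrel pages_order_rules b c = false → pvRrel pages_order_rules c b = false →
        pvRrel pages_order_rules a c = false ∧ pvRrel pages_order_rules c a = false)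

instance (pages_order_rules : List (Int × List (String × List Int))) (updates : List (List Int)) : Decidable (Pre_valid_pages_order pages_order_rules updates) := by
  unfold Pre_valid_pages_order; infer_instance

def pvWitness_valid_pages_order : (List (Int × List (String × List Int))) × List (List Int) :=
  ([(1, [("l", []), ("r", [2])]), (2, [("l", [1]), ("r", [])])], [[1, 2], [2, 1], []])

def Spec_valid_pages_order (pages_order_rules : List (Int × List (String × List Int))) (updates : List (List Int)) (out : List (List Int) × List (List Int)) : Prop := out = valid_pages_order_alt pages_order_rules updates
instance (pages_order_rules : List (Int × List (String × List Int))) (updates : List (List Int)) (out : List (List Int) × List (List Int)) : Decidable (Spec_valid_pages_order pages_order_rules updates out) := by unfold Spec_valid_pages_order; infer_instance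

-- ===== CLAIM (what is proved, stated in full; the proofs are below) =====
def Claim_equal_valid_pages_order : Prop := ∀ (pages_order_rules : List (Int × List (String × List Int))) (updates : List (List Int)), Dom_valid_pages_order pages_order_rules updates → Pre_valid_pages_order pages_order_rules updates → Spec_valid_pages_order pages_order_rules updates (valid_pages_order pages_order_rules updates)

-- ===== LEMMAS AND PROOFS =====

-- B's inlined comparator computes A's comparator value
theorem pvCmpB_eq (rules : List (Int × List (String × List Int))) (x y : Int) :
    pvCmpB rules x y = pvCmp rules x y := by
  unfold pvCmpB pvCmp pvInKeys pvSide pvRulesGet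
  cases h : rules.lookup x <;> simp

theorem pvLtB_eq (rules : List (Int × List (String × List Int))) :
    (fun a b => pvLtB rules a b) = (fun a b => pvLt rules a b) := by
  funext a b; unfold pvLtB pvLt; rw [pvCmpB_eq]

theorem pvSortB_eq (rules : List (Int × List (String × List Int))) (u : List Int) :
    pvSortB rules u = pvSortCmp rules u := by
  unfold pvSortB pvSortCmp; rw [pvLtB_eq]

-- A's scan returns true iff no index q ≥ i is "bad"
theorem pvScan_true_iff (rules : List (Int × List (String × List Int))) (u : List Int) :
    ∀ k i, u.length - i ≤ k → (pvScan rules u i = true ↔ ∀ q, i ≤ q → q < u.length → pvBadAt rules u q = false) := by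
  intro k
  induction k with
  | zero =>
      intro i hk
      rw [pvScan]
      have : ¬ i < u.length := by omega
      simp [this]
      intro q hq hlt; omega
  | succ k ih =>
      intro i hk
      rw [pvScan]
      by_cases h : i < u.length
      · simp only [h, dif_pos]
        by_cases hb : pvBadAt rules u i = true
        · rw [if_pos hb]
          constructor
          · intro h'; exact absurd h' (by simp)
          · intro hall; exact absurd (hall i le_rfl h) (by simp [hb])
        · simp only [Bool.not_eq_true] at hb
          rw [if_neg (by simp [hb])]
          rw [ih (i+1) (by omega)]
          constructor
          · intro hall q hq hlt
            rcases Nat.eq_or_lt_of_le hq with rfl | hlt'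
            · exact hb
            · exact hall q hlt' hlt
          · intro hall q hq hlt
            exact hall q (by omega) hlt
      · simp [h]
        intro q hq hlt; omega

-- "no index is bad" is exactly "no pvRrel inversion", under coherence (h3) and irreflexivity (h4)
theorem pvNoBad_iff_pairwise (rules : List (Int × List (String × List Int))) (u : List Int)
    (h3 : ∀ a ∈ u, ∀ b ∈ u, pvLrel rules a b = pvRrel rules a b)
    (h4 : ∀ a ∈ u, pvRrel rules a a = false) :
    (∀ q, q < u.length → pvBadAt rules u q = false) ↔ u.Pairwise (fun a b => pvRrel rules b a = false) := by
  rw [List.pairwise_iff_getElem]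
  constructor
  · intro hnb p q hp hq hpq
    by_contra hcon
    simp only [Bool.not_eq_false] at hcon
    have hbad : pvBadAt rules u q = true := by
      unfold pvBadAt
      rw [List.getElem?_eq_getElem hq]
      simp only [pvRrel, Bool.and_eq_true] at hcon
      simp only [Bool.and_eq_true, Bool.or_eq_true, List.any_eq_true, List.contains_eq_mem,
        decide_eq_true_eq]
      refine ⟨hcon.1, Or.inl ⟨u[p], by simpa using hcon.2, ?_⟩⟩
      rw [List.mem_take_iff_getElem]
      exact ⟨p, by omega, by simp⟩
    rw [hnb q hq] at hbad; cases hbad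
  · intro hpw q hq
    by_contra hcon
    simp only [Bool.not_eq_false] at hcon
    unfold pvBadAt at hcon
    rw [List.getElem?_eq_getElem hq] at hcon
    simp only [Bool.and_eq_true, Bool.or_eq_true, List.any_eq_true, List.contains_eq_mem,
      decide_eq_true_eq] at hcon
    obtain ⟨hkey, hcase⟩ := hcon
    rcases hcase with ⟨page, hpr, hpt⟩ | ⟨page, hpl, hpd⟩
    · rw [List.mem_take_iff_getElem] at hpt
      obtain ⟨j, hj, hje⟩ := hpt
      have : pvRrel rules u[q] u[j] = true := by
        simp only [pvRrel, Bool.and_eq_true]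
        exact ⟨hkey, by simp [hje, hpr]⟩
      rw [hpw j q (by omega) hq (by omega)] at this; cases this
    · rw [List.mem_drop_iff_getElem] at hpd
      obtain ⟨j, hj, hje⟩ := hpd
      have hmemq : u[q] ∈ u := List.getElem_mem hq
      have hmemj : u[q + j] ∈ u := List.getElem_mem (by omega)
      have hL : pvLrel rules u[q+j] u[q] = true := by
        simp only [pvLrel, Bool.and_eq_true]
        exact ⟨hkey, by simp [hje, hpl]⟩
      rw [h3 _ hmemj _ hmemq] at hL
      rcases Nat.eq_zero_or_pos j with rfl | hjpos
      · simp only [Nat.add_zero] at hL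
        rw [h4 _ hmemq] at hL; cases hL
      · rw [hpw q (q + j) hq (by omega) (by omega)] at hL; cases hL

-- the comparator's __lt__ coincides with pvRrel on the update's pages
theorem pvLt_eq_pvRrel (rules : List (Int × List (String × List Int))) (u : List Int)
    (h3 : ∀ a ∈ u, ∀ b ∈ u, pvLrel rules a b = pvRrel rules a b)
    (h4 : ∀ a ∈ u, pvRrel rules a a = false)
    (h5 : ∀ a ∈ u, ∀ b ∈ u, ∀ c ∈ u, pvRrel rules a b = true → pvRrel rules b c = true → pvRrel rules a c = true)
    (a b : Int) (ha : a ∈ u) (hb : b ∈ u) :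
    pvLt rules a b = pvRrel rules a b := by
  have hfirst : (pvInKeys rules a && (pvSide rules a "l").contains b) = pvLrel rules b a := rfl
  have hsecond : (pvInKeys rules a && (pvSide rules a "r").contains b) = pvRrel rules a b := rfl
  unfold pvLt pvCmp
  rw [hfirst, hsecond, h3 b hb a ha]
  cases hab : pvRrel rules a b with
  | true =>
      have hba : pvRrel rules b a = false := by
        by_contra hc
        simp only [Bool.not_eq_false] at hc
        have := h5 a ha b hb a ha hab hc
        rw [h4 a ha] at this; cases this
      simp [hba]
  | false =>
      cases hba : pvRrel rules b a <;> simp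

-- inserting into a pvLt-sorted accumulator keeps membership in the ambient list w
theorem pvInsertBy_mem_w {α : Type} (lt : α → α → Bool) (w : List α) (x : α) (hx : x ∈ w)
    (acc : List α) (hacc : ∀ y ∈ acc, y ∈ w) : ∀ y ∈ PySem.List.insertBy lt x acc, y ∈ w := by
  intro y hy
  rcases (PySem.List.mem_insertBy lt x y acc).mp hy with rfl | h
  · exact hx
  · exact hacc y h

-- insertBy preserves sortedness (lt asymmetric and transitive on the ambient list w)
theorem pvInsertBy_pairwise {α : Type} (lt : α → α → Bool) (w : List α)
    (hasym : ∀ a ∈ w, ∀ b ∈ w, ¬(lt a b = true ∧ lt b a = true))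
    (htrans : ∀ a ∈ w, ∀ b ∈ w, ∀ c ∈ w, lt a b = true → lt b c = true → lt a c = true)
    (x : α) (hx : x ∈ w) :
    ∀ acc : List α, (∀ y ∈ acc, y ∈ w) → acc.Pairwise (fun a b => lt b a = false) →
      (PySem.List.insertBy lt x acc).Pairwise (fun a b => lt b a = false) := by
  intro acc
  induction acc with
  | nil => intro _ _; simp [PySem.List.insertBy]
  | cons y ys ih =>
      intro hacc hpw
      rw [PySem.List.insertBy]
      by_cases hxy : lt x y = true
      · rw [if_pos hxy]
        rw [List.pairwise_cons]
        refine ⟨?_, hpw⟩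
        intro z hz
        rcases List.mem_cons.mp hz with rfl | hz
        · by_contra hc
          simp only [Bool.not_eq_false] at hc
          exact hasym x hx z (hacc z (by simp)) ⟨hxy, hc⟩
        · by_contra hc
          simp only [Bool.not_eq_false] at hc
          have hzy : lt z y = true :=
            htrans z (hacc z (by simp [hz])) x hx y (hacc y (by simp)) hc hxy
          have := (List.pairwise_cons.mp hpw).1 z hz
          rw [hzy] at this; cases this
      · rw [if_neg hxy]
        rw [List.pairwise_cons]
        constructor
        · intro z hz
          rcases (PySem.List.mem_insertBy lt x z ys).mp hz with rfl | hz'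
          · simpa using hxy
          · exact (List.pairwise_cons.mp hpw).1 z hz'
        · exact ih (fun z hz => hacc z (by simp [hz])) (List.pairwise_cons.mp hpw).2

-- the whole insertion sort produces a sorted list
theorem pvFoldl_insert_pairwise {α : Type} (lt : α → α → Bool) (w : List α)
    (hasym : ∀ a ∈ w, ∀ b ∈ w, ¬(lt a b = true ∧ lt b a = true))
    (htrans : ∀ a ∈ w, ∀ b ∈ w, ∀ c ∈ w, lt a b = true → lt b c = true → lt a c = true) :
    ∀ (u acc : List α), (∀ x ∈ u, x ∈ w) → (∀ y ∈ acc, y ∈ w) →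
      acc.Pairwise (fun a b => lt b a = false) →
      (u.foldl (fun acc x => PySem.List.insertBy lt x acc) acc).Pairwise (fun a b => lt b a = false) := by
  intro u
  induction u with
  | nil => intro acc _ _ hpw; simpa using hpw
  | cons x rest ih =>
      intro acc hu hacc hpw
      simp only [List.foldl_cons]
      exact ih _ (fun z hz => hu z (by simp [hz]))
        (pvInsertBy_mem_w lt w x (hu x (by simp)) acc hacc)
        (pvInsertBy_pairwise lt w hasym htrans x (hu x (by simp)) acc hacc hpw)

-- the insertion sort of an inversion-free list appends every element at the end
theorem pvFoldl_insert_fixed {α : Type} (lt : α → α → Bool) :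
    ∀ (u acc : List α), (∀ x ∈ u, ∀ y ∈ acc, lt x y = false) →
      u.Pairwise (fun a b => lt b a = false) →
      u.foldl (fun acc x => PySem.List.insertBy lt x acc) acc = acc ++ u := by
  intro u
  induction u with
  | nil => intro acc _ _; simp
  | cons x rest ih =>
      intro acc hcross hpw
      simp only [List.foldl_cons]
      rw [PySem.List.insertBy_of_forall_not_before lt x acc (fun y hy => hcross x (by simp) y hy)]
      rw [ih (acc ++ [x]) ?_ (List.pairwise_cons.mp hpw).2]
      · simp
      · intro z hz y hy
        rcases List.mem_append.mp hy with hy' | hy'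
        · exact hcross z (by simp [hz]) y hy'
        · have : y = x := by simpa using hy'
          subst this
          exact (List.pairwise_cons.mp hpw).1 z hz
-- the sort fixes u iff u has no pvLt-inversion
theorem pvSortCmp_fix_iff (rules : List (Int × List (String × List Int))) (u : List Int)
    (h3 : ∀ a ∈ u, ∀ b ∈ u, pvLrel rules a b = pvRrel rules a b)
    (h4 : ∀ a ∈ u, pvRrel rules a a = false)
    (h5 : ∀ a ∈ u, ∀ b ∈ u, ∀ c ∈ u, pvRrel rules a b = true → pvRrel rules b c = true → pvRrel rules a c = true) :
    pvSortCmp rules u = u ↔ u.Pairwise (fun a b => pvLt rules b a = false) := by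
  have hE : ∀ a ∈ u, ∀ b ∈ u, pvLt rules a b = pvRrel rules a b := fun a ha b hb =>
    pvLt_eq_pvRrel rules u h3 h4 h5 a b ha hb
  have hasym : ∀ a ∈ u, ∀ b ∈ u, ¬(pvLt rules a b = true ∧ pvLt rules b a = true) := by
    intro a ha b hb ⟨h1, h2⟩
    rw [hE a ha b hb] at h1
    rw [hE b hb a ha] at h2
    have := h5 a ha b hb a ha h1 h2
    rw [h4 a ha] at this; cases this
  have htrans : ∀ a ∈ u, ∀ b ∈ u, ∀ c ∈ u, pvLt rules a b = true → pvLt rules b c = true → pvLt rules a c = true := by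
    intro a ha b hb c hc h1 h2
    rw [hE a ha b hb] at h1
    rw [hE b hb c hc] at h2
    rw [hE a ha c hc]
    exact h5 a ha b hb c hc h1 h2
  constructor
  · intro h
    have hp := pvFoldl_insert_pairwise (fun a b => pvLt rules a b) u hasym htrans u []
      (fun x hx => hx) (by simp) (by simp)
    unfold pvSortCmp at h
    rw [h] at hp
    exact hp
  · intro hpw
    unfold pvSortCmp
    rw [pvFoldl_insert_fixed (fun a b => pvLt rules a b) u [] (by simp) hpw]
    simp

-- per update: A's scan succeeds iff the sort fixes the update
theorem pvStep_iff (rules : List (Int × List (String × List Int))) (u : List Int)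
    (h3 : ∀ a ∈ u, ∀ b ∈ u, pvLrel rules a b = pvRrel rules a b)
    (h4 : ∀ a ∈ u, pvRrel rules a a = false)
    (h5 : ∀ a ∈ u, ∀ b ∈ u, ∀ c ∈ u, pvRrel rules a b = true → pvRrel rules b c = true → pvRrel rules a c = true) :
    (pvScan rules u 0 = true ↔ pvSortCmp rules u = u) := by
  rw [pvScan_true_iff rules u u.length 0 (by omega)]
  rw [pvSortCmp_fix_iff rules u h3 h4 h5]
  have hE : ∀ a ∈ u, ∀ b ∈ u, pvLt rules a b = pvRrel rules a b := fun a ha b hb =>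
    pvLt_eq_pvRrel rules u h3 h4 h5 a b ha hb
  have h1 : (∀ q, 0 ≤ q → q < u.length → pvBadAt rules u q = false) ↔ (∀ q, q < u.length → pvBadAt rules u q = false) := by
    constructor
    · intro h q hq; exact h q (by omega) hq
    · intro h q _ hq; exact h q hq
  rw [h1, pvNoBad_iff_pairwise rules u h3 h4]
  rw [List.pairwise_iff_getElem, List.pairwise_iff_getElem]
  constructor
  · intro h p q hp hq hpq
    rw [hE u[q] (List.getElem_mem hq) u[p] (List.getElem_mem hp)]
    exact h p q hp hq hpq
  · intro h p q hp hq hpq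
    have := h p q hp hq hpq
    rw [hE u[q] (List.getElem_mem hq) u[p] (List.getElem_mem hp)] at this
    exact this

-- A's one-loop fold, phrased with 'sorted fixes u' as the branch condition, equals B's staged
-- map-then-filter pipeline (generic in the sorting function s)
theorem pvFold_eq_staged (s : List Int → List Int) :
    ∀ (ups : List (List Int)) (l1 l2 : List (List Int)),
      ups.foldl
        (fun acc u => if s u = u then (acc.1 ++ [u], acc.2) else (acc.1, acc.2 ++ [s u]))
        (l1, l2)
      = (l1 ++ ((ups.map (fun u => (u, s u))).filter (fun p => p.2 == p.1)).map Prod.fst,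
         l2 ++ ((ups.map (fun u => (u, s u))).filter (fun p => !(p.2 == p.1))).map Prod.snd) := by
  intro ups
  induction ups with
  | nil => intro l1 l2; simp
  | cons u rest ih =>
      intro l1 l2
      simp only [List.foldl_cons, List.map_cons, List.filter_cons]
      by_cases h : s u = u
      · simp only [h, if_true]
        rw [ih]
        simp
      · have hb : ((u, s u).snd == (u, s u).fst) = false := by
          simp [h]
        rw [if_neg h, ih]
        simp [hb]

-- ===== VERDICT (by name: the statement is the Claim_ definition above) =====
theorem valid_pages_order_spec : Claim_equal_valid_pages_order := by
  intro rules updates _hdom hpre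
  unfold Spec_valid_pages_order valid_pages_order valid_pages_order_alt
  -- rewrite B's sort to A's (the comparators are the same function)
  have hsB : (fun update => (update, pvSortB rules update))
           = (fun update => (update, pvSortCmp rules update)) := by
    funext u; rw [pvSortB_eq]
  rw [hsB]
  -- replace A's scan branch by the 'sorted fixes u' branch, update by update
  have hcong : updates.foldl
      (fun acc update =>
        if pvScan rules update 0 then (acc.1 ++ [update], acc.2)
        else (acc.1, acc.2 ++ [pvSortCmp rules update])) ([], [])
    = updates.foldl
      (fun acc u => if pvSortCmp rules u = u then (acc.1 ++ [u], acc.2)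
        else (acc.1, acc.2 ++ [pvSortCmp rules u])) ([], []) := by
    apply PySem.List.foldl_congr_mem
    intro acc u hu
    obtain ⟨_, h3, h4, h5, _⟩ := hpre u hu
    have hiff := pvStep_iff rules u h3 h4 h5
    by_cases hs : pvSortCmp rules u = u
    · rw [if_pos (hiff.mpr hs), if_pos hs]
    · have hscan : pvScan rules u 0 = false := by
        cases h : pvScan rules u 0
        · rfl
        · exact absurd (hiff.mp h) hs
      rw [hscan, if_neg hs]
      simp
  rw [hcong, pvFold_eq_staged (pvSortCmp rules) updates [] []]
  simp
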